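-- pv_equiv track=rewrite | github.com/Soupazade/Bleach | src/services/formulas.py | calculate_passive_stamina_recovery
-- ===== SOURCE A (Python) =====
-- def calculate_passive_stamina_recovery(
--     current_stamina: int,
--     stamina_max: int,
--     elapsed_minutes: int,
-- ) -> int:
--     stamina = current_stamina
--
--     for _ in range(max(0, elapsed_minutes)):
--         if stamina >= stamina_max:
--             break
--
--         regen_amount = 3 if stamina < 50 else 2
--         stamina = min(stamina_max, stamina + regen_amount)
--
--     return stamina - current_stamina
-- ===== SOURCE B (Python) =====
-- def calculate_passive_stamina_recovery(current_stamina, stamina_max, elapsed_minutes):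
--     m = max(0, elapsed_minutes)
--     s = current_stamina
--     if s >= stamina_max:
--         return 0
--     if s >= 50:
--         return min(stamina_max, s + 2 * m) - current_stamina
--     k = (min(50, stamina_max) - s + 2) // 3  # ceil((min(50,M)-s)/3): minutes spent in the <50 phase
--     p1 = min(m, k)
--     return min(stamina_max, s + 3 * p1 + 2 * (m - p1)) - current_stamina
-- ===== Notes on version B (the rewrite author's own statement) =====
-- stated objective: faster
-- what changed: Replaced the per-minute simulation loop with O(1) closed-form arithmetic: a ceiling division computes how many minutes the +3 (<50) phase lasts, and a single min-capped formula accounts for both regen phases.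
import Mathlib
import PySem

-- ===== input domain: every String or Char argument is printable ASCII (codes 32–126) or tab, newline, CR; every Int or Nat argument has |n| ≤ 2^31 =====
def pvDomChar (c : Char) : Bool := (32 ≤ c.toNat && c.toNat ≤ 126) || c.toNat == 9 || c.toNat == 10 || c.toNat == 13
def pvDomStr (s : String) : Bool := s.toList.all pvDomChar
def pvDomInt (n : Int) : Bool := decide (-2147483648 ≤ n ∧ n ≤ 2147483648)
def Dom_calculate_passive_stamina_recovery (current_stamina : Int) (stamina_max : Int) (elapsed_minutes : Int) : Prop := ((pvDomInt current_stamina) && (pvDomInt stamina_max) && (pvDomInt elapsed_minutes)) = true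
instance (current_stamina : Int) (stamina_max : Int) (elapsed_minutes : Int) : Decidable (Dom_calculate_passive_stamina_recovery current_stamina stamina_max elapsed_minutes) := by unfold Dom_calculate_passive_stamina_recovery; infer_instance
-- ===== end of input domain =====

-- B replaces A's minute-by-minute regen loop with O(1) closed-form piecewise arithmetic (faster, asymptotic).

-- ===== PORT A =====
-- the for-loop over range(max(0, elapsed_minutes)) with early break, state = stamina
def pvLoopA (stamina_max : Int) : Nat → Int → Int
  | 0, stamina => stamina
  | n + 1, stamina =>
      if stamina ≥ stamina_max then stamina
      else pvLoopA stamina_max n (min stamina_max (stamina + (if stamina < 50 then 3 else 2)))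

def calculate_passive_stamina_recovery (current_stamina : Int) (stamina_max : Int) (elapsed_minutes : Int) : Int :=
  pvLoopA stamina_max (max 0 elapsed_minutes).toNat current_stamina - current_stamina

-- ===== PORT B =====
def calculate_passive_stamina_recovery_alt (current_stamina : Int) (stamina_max : Int) (elapsed_minutes : Int) : Int :=
  let m := max 0 elapsed_minutes
  let s := current_stamina
  if s ≥ stamina_max then 0
  else if s ≥ 50 then min stamina_max (s + 2 * m) - current_stamina
  else
    let k := PySem.Int.floordiv (min 50 stamina_max - s + 2) 3
    let p1 := min m k
    min stamina_max (s + 3 * p1 + 2 * (m - p1)) - current_stamina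

-- ===== PRECONDITION & SPEC =====
def Spec_calculate_passive_stamina_recovery (current_stamina : Int) (stamina_max : Int) (elapsed_minutes : Int) (out : Int) : Prop := out = calculate_passive_stamina_recovery_alt current_stamina stamina_max elapsed_minutes
instance (current_stamina : Int) (stamina_max : Int) (elapsed_minutes : Int) (out : Int) : Decidable (Spec_calculate_passive_stamina_recovery current_stamina stamina_max elapsed_minutes out) := by unfold Spec_calculate_passive_stamina_recovery; infer_instance

-- ===== CLAIM (what is proved, stated in full; the proofs are below) =====
def Claim_equal_calculate_passive_stamina_recovery : Prop := ∀ (current_stamina : Int) (stamina_max : Int) (elapsed_minutes : Int), Dom_calculate_passive_stamina_recovery current_stamina stamina_max elapsed_minutes → Spec_calculate_passive_stamina_recovery current_stamina stamina_max elapsed_minutes (calculate_passive_stamina_recovery current_stamina stamina_max elapsed_minutes)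

-- ===== LEMMAS AND PROOFS =====

-- saturated: once stamina ≥ max, the loop never changes it
theorem pvLoopA_sat (M : Int) (n : Nat) (s : Int) (h : M ≤ s) : pvLoopA M n s = s := by
  induction n with
  | zero => rfl
  | succ n ih => simp [pvLoopA, h]

-- phase 2 (stamina ≥ 50): each step adds 2, capped at M
theorem pvLoopA_phase2 (M : Int) (n : Nat) : ∀ s : Int, 50 ≤ s → s ≤ M →
    pvLoopA M n s = min M (s + 2 * n) := by
  induction n with
  | zero => intro s h50 hM; simp [pvLoopA]; omega
  | succ n ih =>
    intro s h50 hM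
    by_cases hsat : s ≥ M
    · rw [pvLoopA_sat M _ s hsat]; push_cast; omega
    · have hlt : ¬ s < 50 := by omega
      simp only [pvLoopA, hsat, if_false, hlt, if_false]
      by_cases hcap : s + 2 ≥ M
      · have : min M (s + 2) = M := by omega
        rw [this, pvLoopA_sat M n M le_rfl]; omega
      · have : min M (s + 2) = s + 2 := by omega
        rw [this, ih (s + 2) (by omega) (by omega)]; push_cast; omega

-- phase 1 (stamina < 50): +3 per step for k steps, then +2 per step, capped at M
theorem pvLoopA_phase1 (M : Int) (n : Nat) : ∀ s : Int, s < 50 → s ≤ M →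
    pvLoopA M n s =
      min M (s + 3 * min (n : Int) ((min 50 M - s + 2) / 3)
               + 2 * ((n : Int) - min (n : Int) ((min 50 M - s + 2) / 3))) := by
  induction n with
  | zero =>
    intro s h50 hM
    have hk : 0 ≤ (min 50 M - s + 2) / 3 := by omega
    simp [pvLoopA]; omega
  | succ n ih =>
    intro s h50 hM
    by_cases hsat : s ≥ M
    · have hs : s = M := le_antisymm hM hsat
      rw [pvLoopA_sat M _ s hsat]
      have hk : 0 ≤ (min 50 M - s + 2) / 3 := by omega
      push_cast; omega
    · simp only [pvLoopA, hsat, if_false, h50, if_pos]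
      have hklb : 1 ≤ (min 50 M - s + 2) / 3 := by omega
      by_cases hdone : 50 ≤ s + 3 ∨ M ≤ s + 3
      · -- the <50 phase ends with this step: k = 1
        have hk1 : (min 50 M - s + 2) / 3 = 1 := by omega
        by_cases hcap : M ≤ s + 3
        · have : min M (s + 3) = M := by omega
          rw [this, pvLoopA_sat M n M le_rfl, hk1]; push_cast; omega
        · have h50' : 50 ≤ s + 3 := by omega
          have : min M (s + 3) = s + 3 := by omega
          rw [this, pvLoopA_phase2 M n (s + 3) h50' (by omega), hk1]; push_cast; omega
      · -- still below 50 and below M after the step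
        push Not at hdone
        have : min M (s + 3) = s + 3 := by omega
        rw [this, ih (s + 3) (by omega) (by omega)]
        have hshift : (min 50 M - (s + 3) + 2) / 3 = (min 50 M - s + 2) / 3 - 1 := by omega
        rw [hshift]; push_cast; omega

-- ===== VERDICT (by name: the statement is the Claim_ definition above) =====
theorem calculate_passive_stamina_recovery_spec : Claim_equal_calculate_passive_stamina_recovery := by
  intro c M e _
  unfold Spec_calculate_passive_stamina_recovery calculate_passive_stamina_recovery
    calculate_passive_stamina_recovery_alt
  have hm : ((max 0 e).toNat : Int) = max 0 e := by omega
  by_cases hsat : c ≥ M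
  · rw [pvLoopA_sat M _ c hsat]; simp [hsat]
  · by_cases h50 : c ≥ 50
    · rw [pvLoopA_phase2 M _ c h50 (by omega), hm]
      simp [hsat, h50]
    · rw [pvLoopA_phase1 M _ c (by omega) (by omega), hm]
      simp [hsat, h50]
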